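-- pv_equiv track=rewrite | github.com/Nothingness-Void/Graduation-project | 实验存档/20260302_six_way_snapshots/03_post_performance/result_snapshot/feature_config.py | resolve_target_col
-- ===== SOURCE A (Python) =====
-- from typing import Iterable
--
-- def resolve_target_col(columns: Iterable[str], preferred: str = "chi_result") -> str:
--     """Resolve target column with fallback for encoding variations."""
--     cols = list(columns)
--     if preferred in cols:
--         return preferred
--
--     candidates = [c for c in cols if "result" in str(c).lower()]
--     if candidates:
--         return candidates[0]
--
--     raise KeyError("未找到目标列：chi_result（或包含 result 的列名）")
-- ===== SOURCE B (Python) =====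
-- def resolve_target_col(columns, preferred="chi_result"):
--     """Single pass: exact match returns immediately; first 'result'-substring column remembered as fallback."""
--     fallback = None
--     for c in columns:
--         if c == preferred:
--             return preferred
--         if fallback is None and "result" in str(c).lower():
--             fallback = c
--     if fallback is not None:
--         return fallback
--     raise KeyError("未找到目标列：chi_result（或包含 result 的列名）")
-- ===== Notes on version B (the rewrite author's own statement) =====
-- stated objective: alternative
-- what changed: B makes a single pass over the iterable keeping a first-substring-match fallback, instead of A's materialized list, membership pass and separate filter comprehension.
import Mathlib
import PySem

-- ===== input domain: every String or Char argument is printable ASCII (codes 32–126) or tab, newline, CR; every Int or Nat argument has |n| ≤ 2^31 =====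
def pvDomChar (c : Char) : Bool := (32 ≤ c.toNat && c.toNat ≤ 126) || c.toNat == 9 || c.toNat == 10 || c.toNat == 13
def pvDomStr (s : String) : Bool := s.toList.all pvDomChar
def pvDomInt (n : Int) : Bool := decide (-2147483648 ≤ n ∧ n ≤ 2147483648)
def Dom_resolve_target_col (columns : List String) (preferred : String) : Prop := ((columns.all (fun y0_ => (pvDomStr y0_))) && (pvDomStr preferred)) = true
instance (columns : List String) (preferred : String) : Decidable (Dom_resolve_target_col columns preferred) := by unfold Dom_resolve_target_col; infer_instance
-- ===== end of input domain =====

-- B resolves the target column in a single pass with a remembered fallback instead of A's membership pass plus filter comprehension (alternative decomposition, return value only; both raise identically outside Pre_).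


-- ===== PORT A =====
-- "result" in str(c).lower()
def pvHasResult (c : String) : Bool := PySem.Str.isIn "result" (PySem.Str.lower c)

def resolve_target_col (columns : List String) (preferred : String) : String :=
  let cols := columns
  if preferred ∈ cols then preferred
  else
    let candidates := cols.filter (fun c => pvHasResult c)
    match candidates with
    | c :: _ => c
    | [] => ""  -- raise KeyError: excluded by Pre_

-- ===== PORT B =====
def resolve_target_col_alt_go (preferred : String) : List String → Option String → String
  | [], fallback => fallback.getD ""  -- raise KeyError: excluded by Pre_
  | c :: rest, fallback =>
    if c == preferred then preferred
    else resolve_target_col_alt_go preferred rest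
      (if fallback.isNone && pvHasResult c then some c else fallback)

def resolve_target_col_alt (columns : List String) (preferred : String) : String :=
  resolve_target_col_alt_go preferred columns none

-- ===== PRECONDITION & SPEC =====
-- Pre_ excludes exactly the inputs where A raises KeyError: no exact match and no column containing "result".
def Pre_resolve_target_col (columns : List String) (preferred : String) : Prop :=
  preferred ∈ columns ∨ ∃ c ∈ columns, pvHasResult c = true
instance (columns : List String) (preferred : String) : Decidable (Pre_resolve_target_col columns preferred) := by unfold Pre_resolve_target_col; infer_instance

def pvWitness_resolve_target_col : List String × String := (["id", "chi_result"], "chi_result")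

def Spec_resolve_target_col (columns : List String) (preferred : String) (out : String) : Prop := out = resolve_target_col_alt columns preferred
instance (columns : List String) (preferred : String) (out : String) : Decidable (Spec_resolve_target_col columns preferred out) := by unfold Spec_resolve_target_col; infer_instance

-- ===== CLAIM (what is proved, stated in full; the proofs are below) =====
def Claim_equal_resolve_target_col : Prop := ∀ (columns : List String) (preferred : String), Dom_resolve_target_col columns preferred → Pre_resolve_target_col columns preferred → Spec_resolve_target_col columns preferred (resolve_target_col columns preferred)

-- ===== LEMMAS AND PROOFS =====

-- B's loop, characterised: exact match wins; otherwise the remembered fallback, else the first filter hit.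
theorem resolve_target_col_alt_go_spec (preferred : String) (cols : List String) (fallback : Option String) :
    resolve_target_col_alt_go preferred cols fallback =
      if preferred ∈ cols then preferred
      else match fallback with
        | some c => c
        | none => (cols.filter (fun c => pvHasResult c)).headD "" := by
  induction cols generalizing fallback with
  | nil => cases fallback <;> simp [resolve_target_col_alt_go, Option.getD]
  | cons c rest ih =>
    by_cases hc : c = preferred
    · subst hc
      simp [resolve_target_col_alt_go]
    · have hne : (c == preferred) = false := by simp [hc]
      simp only [resolve_target_col_alt_go, hne, Bool.false_eq_true, if_false, ih]
      have hmem : preferred ∈ c :: rest ↔ preferred ∈ rest := by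
        simp [List.mem_cons, Ne.symm hc]
      cases fallback with
      | some c0 => simp [hmem]
      | none =>
        by_cases hp : pvHasResult c = true
        · simp [hmem, hp]
        · simp [hmem, hp]

theorem resolve_target_col_eq_alt (columns : List String) (preferred : String) :
    resolve_target_col columns preferred = resolve_target_col_alt columns preferred := by
  unfold resolve_target_col resolve_target_col_alt
  rw [resolve_target_col_alt_go_spec]
  by_cases h : preferred ∈ columns
  · simp [h]
  · simp only [h, if_false]
    cases columns.filter (fun c => pvHasResult c) <;> simp

-- ===== VERDICT (by name: the statement is the Claim_ definition above) =====
theorem resolve_target_col_spec : Claim_equal_resolve_target_col := by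
  intro columns preferred _ _
  exact resolve_target_col_eq_alt columns preferred
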